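-- pv_equiv track=rewrite | github.com/Hwangmyeongje/baekjoon_python | implementation/1212.py | change
-- ===== SOURCE A (Python) =====
-- def change(num,first = False):
--     arr=''
--     while num:
--         arr += str(num%2)
--         num //=2
--     while len(arr) <3:
--         arr += '0'
--     idx =3
--     if first:
--         #첫번째 숫자라면 앞에 0을 없애야함
--         #idx 숫자로 이진수 뒤에 숫자 부터 시작해서 1을 만나면 종료
--         while idx>1 and arr[idx-1] =='0':
--             idx -=1
--     #idx까지 역순으로 출력한다.
--     return arr[:idx][::-1]
-- ===== SOURCE B (Python) =====
-- def change(num, first=False):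
--     bits = num % 8
--     b = format(bits, 'b')
--     return b if first else b.zfill(3)
-- ===== Notes on version B (the rewrite author's own statement) =====
-- stated objective: idiomatic
-- what changed: Replaces A's LSB-first remainder/quotient while-loop, manual right-padding, first-flag index scan and reverse-slice by taking num % 8 once and library-formatting it in binary (zero-padded to 3 unless first).
-- outside the precondition, e.g. on change(-1, False): A does not finish within the time limit, B returns '111'
import Mathlib
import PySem

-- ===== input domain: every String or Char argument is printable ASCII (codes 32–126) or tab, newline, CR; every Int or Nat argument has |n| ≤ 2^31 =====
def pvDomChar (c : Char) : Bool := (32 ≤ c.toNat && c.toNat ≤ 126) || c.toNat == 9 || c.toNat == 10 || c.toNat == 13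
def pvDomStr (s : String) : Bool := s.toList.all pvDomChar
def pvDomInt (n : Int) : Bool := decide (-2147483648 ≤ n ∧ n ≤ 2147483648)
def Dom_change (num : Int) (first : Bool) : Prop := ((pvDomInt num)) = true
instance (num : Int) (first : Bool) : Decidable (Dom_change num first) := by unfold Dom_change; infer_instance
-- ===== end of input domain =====

-- B changes the algorithm: num % 8 formatted in binary by the library, instead of A's digit loop + padding + scan + reverse-slice.
-- ===== PORT A =====

-- 'while num: arr += str(num%2); num //= 2'  (guard 0 < num totalizes: for num < 0 Python loops forever, excluded by Pre_)
def changeLoopA (num : Int) (arr : List Char) : List Char :=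
  if _h : 0 < num then
    changeLoopA (PySem.Int.floordiv num 2) (arr ++ (PySem.Int.toStr (PySem.Int.mod num 2)).toList)
  else arr
termination_by num.toNat
decreasing_by
  rw [PySem.Int.floordiv_eq_ediv_of_pos (by omega : (0:Int) < 2)]
  omega

-- 'while len(arr) < 3: arr += "0"'
def changePadA (arr : List Char) : List Char :=
  if arr.length < 3 then changePadA (arr ++ ['0']) else arr
termination_by 3 - arr.length
decreasing_by
  simp only [List.length_append, List.length_cons, List.length_nil]
  omega

-- 'while idx > 1 and arr[idx-1] == "0": idx -= 1'
def changeIdxA (arr : List Char) (idx : Int) : Int :=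
  if h : 1 < idx ∧ PySem.List.pyGet? arr (idx - 1) = some '0' then
    changeIdxA arr (idx - 1)
  else idx
termination_by idx.toNat
decreasing_by omega

def change (num : Int) (first : Bool) : String :=
  let arr := changePadA (changeLoopA num [])
  let idx : Int := if first then changeIdxA arr 3 else 3
  -- 'return arr[:idx][::-1]'
  String.mk (PySem.List.slice arr none (some idx)).reverse

-- ===== PORT B =====
-- 'bits = num % 8; b = format(bits, "b"); return b if first else b.zfill(3)'
def change_alt (num : Int) (first : Bool) : String :=
  let bits := PySem.Int.mod num 8
  let b := Nat.toDigits 2 bits.toNat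
  if first then String.mk b else String.mk (List.replicate (3 - b.length) '0' ++ b)

-- ===== PRECONDITION & SPEC =====
-- Pre_ excludes negative num, on which A's while-loop never terminates (num //= 2 stays negative).
def Pre_change (num : Int) (first : Bool) : Prop := 0 ≤ num
instance (num : Int) (first : Bool) : Decidable (Pre_change num first) := by unfold Pre_change; infer_instance
def pvWitness_change : Int × Bool := (5, true)

def Spec_change (num : Int) (first : Bool) (out : String) : Prop := out = change_alt num first
instance (num : Int) (first : Bool) (out : String) : Decidable (Spec_change num first out) := by unfold Spec_change; infer_instance

-- ===== CLAIM (what is proved, stated in full; the proofs are below) =====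
def Claim_equal_change : Prop := ∀ (num : Int) (first : Bool), Dom_change num first → Pre_change num first → Spec_change num first (change num first)

-- ===== LEMMAS AND PROOFS =====

-- LSB-first binary digits of n (empty for 0), the value changeLoopA accumulates
def changeBits : Nat → List Char
  | n => if h : n = 0 then [] else (if n % 2 = 1 then '1' else '0') :: changeBits (n / 2)
termination_by n => n
decreasing_by omega

-- low k bits, LSB first
def lowbits : Nat → Nat → List Char
  | 0, _ => []
  | k+1, n => (if n % 2 = 1 then '1' else '0') :: lowbits k (n / 2)

theorem changeLoopA_eq (n : Nat) : ∀ arr, changeLoopA (n : Int) arr = arr ++ changeBits n := by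
  induction n using Nat.strong_induction_on with
  | _ n ih =>
    intro arr
    rw [changeLoopA, changeBits]
    by_cases h0 : n = 0
    · subst h0; simp
    · rw [dif_pos (by exact_mod_cast Nat.pos_of_ne_zero h0), dif_neg h0]
      have hfd : PySem.Int.floordiv (n:Int) 2 = ((n/2 : Nat):Int) := by
        exact_mod_cast PySem.Int.floordiv_natCast n 2
      have hmd : PySem.Int.mod (n:Int) 2 = ((n%2 : Nat):Int) := by
        exact_mod_cast PySem.Int.mod_natCast n 2
      rw [hfd, hmd, ih (n/2) (by omega)]
      have t0 : PySem.Int.toChars 0 = ['0'] := by decide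
      have t1 : PySem.Int.toChars 1 = ['1'] := by decide
      rcases Nat.mod_two_eq_zero_or_one n with h|h <;> rw [h] <;>
        simp [List.append_assoc, t0, t1]

theorem changePadA_eq (arr : List Char) : changePadA arr = arr ++ List.replicate (3 - arr.length) '0' := by
  by_cases h : arr.length < 3
  · rw [changePadA, if_pos h, changePadA_eq (arr ++ ['0'])]
    simp only [List.append_assoc, List.length_append, List.length_cons, List.length_nil]
    congr 1
    have : 3 - arr.length = (3 - (arr.length + 1)) + 1 := by omega
    rw [this, List.replicate_succ]
    rfl
  · rw [changePadA, if_neg h]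
    have : 3 - arr.length = 0 := by omega
    simp [this]
termination_by 3 - arr.length
decreasing_by simp only [List.length_append, List.length_cons, List.length_nil]; omega

-- closed form of the idx scan
theorem idxA3 (arr : List Char) : changeIdxA arr 3 =
    if PySem.List.pyGet? arr 2 = some '0' then
      (if PySem.List.pyGet? arr 1 = some '0' then 1 else 2) else 3 := by
  have e2 : (3:Int) - 1 = 2 := by norm_num
  have e1 : (2:Int) - 1 = 1 := by norm_num
  by_cases h2 : PySem.List.pyGet? arr 2 = some '0'
  · by_cases h1 : PySem.List.pyGet? arr 1 = some '0'
    · rw [changeIdxA]; rw [e2, dif_pos ⟨by norm_num, h2⟩]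
      rw [changeIdxA]; rw [e1, dif_pos ⟨by norm_num, h1⟩]
      rw [changeIdxA]; simp [h2, h1]
    · rw [changeIdxA]; rw [e2, dif_pos ⟨by norm_num, h2⟩]
      rw [changeIdxA]; rw [e1]; simp [h2, h1]
  · rw [changeIdxA]; rw [e2]; simp [h2]

def tail3 (t : List Char) (first : Bool) : String :=
  let idx : Int := if first then
      (if t[2]? = some '0' then (if t[1]? = some '0' then 1 else 2) else 3) else 3
  String.mk (t.take idx.toNat).reverse

theorem pyGet_take3 (arr : List Char) (i : Nat) (hi : i < 3) :
    PySem.List.pyGet? arr (i : Int) = (arr.take 3)[i]? := by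
  rw [PySem.List.pyGet?_natCast, List.getElem?_take_of_lt hi]

theorem slice_take3 (arr : List Char) (k : Int) (h0 : 0 ≤ k) (h3 : k ≤ 3) :
    PySem.List.slice arr none (some k) = (arr.take 3).take k.toNat := by
  refine (PySem.List.slice_to arr h0).trans ?_
  rw [List.take_take]
  congr 1
  omega

theorem change_eq_tail3 (n : Nat) (first : Bool) :
    change (n : Int) first =
      tail3 ((changeBits n ++ List.replicate (3 - (changeBits n).length) '0').take 3) first := by
  have hA := changeLoopA_eq n []
  simp only [List.nil_append] at hA
  simp only [change]
  rw [hA, changePadA_eq]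
  set arr := changeBits n ++ List.replicate (3 - (changeBits n).length) '0' with harr
  have g2 : PySem.List.pyGet? arr 2 = (arr.take 3)[2]? := by
    exact_mod_cast pyGet_take3 arr 2 (by omega)
  have g1 : PySem.List.pyGet? arr 1 = (arr.take 3)[1]? := by
    exact_mod_cast pyGet_take3 arr 1 (by omega)
  rw [idxA3, g2, g1]
  simp only [tail3]
  split_ifs <;> rw [slice_take3 _ _ (by norm_num) (by norm_num)]

theorem lowbits_zero (k : Nat) : lowbits k 0 = List.replicate k '0' := by
  induction k with
  | zero => rfl
  | succ k ih => simp [lowbits, ih, List.replicate_succ]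

theorem take_k_bits (k : Nat) : ∀ n, (changeBits n ++ List.replicate k '0').take k = lowbits k n := by
  induction k with
  | zero => intro n; simp [lowbits]
  | succ k ih =>
    intro n
    by_cases h0 : n = 0
    · subst h0
      rw [changeBits]
      simp [lowbits_zero, List.replicate_succ, lowbits]
    · rw [changeBits, dif_neg h0]
      show ((if n % 2 = 1 then '1' else '0') :: (changeBits (n / 2) ++ List.replicate (k+1) '0')).take (k+1) = lowbits (k+1) n
      rw [List.take_succ_cons, lowbits]
      congr 1
      rw [List.replicate_succ', ← List.append_assoc,
        List.take_append_of_le_length (by simp only [List.length_append, List.length_replicate]; omega), ← ih (n / 2)]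

theorem take_pad_eq_lowbits (n : Nat) :
    (changeBits n ++ List.replicate (3 - (changeBits n).length) '0').take 3 = lowbits 3 n := by
  rw [← take_k_bits 3 n,
    List.take_append, List.take_append,
    List.take_replicate, List.take_replicate]
  congr 2
  omega

theorem lowbits_mod (n : Nat) : lowbits 3 n = lowbits 3 (n % 8) := by
  have h1 : n % 8 % 2 = n % 2 := by omega
  have h2 : n % 8 / 2 % 2 = n / 2 % 2 := by omega
  have h3 : n % 8 / 2 / 2 % 2 = n / 2 / 2 % 2 := by omega
  simp [lowbits, h1, h2, h3]

theorem alt_eq (n : Nat) (first : Bool) :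
    change_alt (n : Int) first =
      (let b := Nat.toDigits 2 (n % 8)
       if first then String.mk b else String.mk (List.replicate (3 - b.length) '0' ++ b)) := by
  have hm : ((n:Int) % 8).toNat = n % 8 := by omega
  simp [change_alt, hm]

theorem final_cases (r : Nat) (hr : r < 8) (first : Bool) :
    tail3 (lowbits 3 r) first =
      (let b := Nat.toDigits 2 r
       if first then String.mk b else String.mk (List.replicate (3 - b.length) '0' ++ b)) := by
  interval_cases r <;> cases first <;> decide

theorem main_lemma (n : Nat) (first : Bool) : change (n : Int) first = change_alt (n : Int) first := by
  rw [change_eq_tail3, take_pad_eq_lowbits, lowbits_mod, alt_eq,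
    final_cases (n % 8) (by omega) first]

-- ===== VERDICT (by name: the statement is the Claim_ definition above) =====
theorem change_spec : Claim_equal_change := by
  intro num first _ hpre
  obtain ⟨n, rfl⟩ := Int.eq_ofNat_of_zero_le hpre
  exact main_lemma n first
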